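-- pv_equiv track=rewrite | github.com/YUVARAJ-R-ai/My_math_database | con_input.py | sep_elem
-- ===== SOURCE A (Python) =====
-- def sep_elem(l1,ele):
--     c=l1.count(ele)
--     newl=[]
--     emp=[]
--     for i in range(len(l1)):
--         if l1[i]==ele:
--             emp.append(i)
--     len_e=len(emp)
--     for j in range (len_e-1):
--         newl+=[l1[emp[j]+1:emp[j+1]]]
--     return newl
-- ===== SOURCE B (Python) =====
-- def sep_elem(l1, ele):
--     # one streaming pass: buffer between occurrences, flag whether an
--     # occurrence has been seen yet; trailing buffer is never emitted
--     newl = []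
--     buf = []
--     seen = False
--     for x in l1:
--         if x == ele:
--             if seen:
--                 newl.append(buf)
--             seen = True
--             buf = []
--         elif seen:
--             buf.append(x)
--     return newl
-- ===== Notes on version B (the rewrite author's own statement) =====
-- stated objective: simpler
-- what changed: Replaces A's two index-based passes (build a table of occurrence indices, then slice between consecutive indices) with one streaming pass carrying a seen-flag and a current buffer, emitting the buffer at each repeated occurrence; no index table and no slicing.
import Mathlib
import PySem

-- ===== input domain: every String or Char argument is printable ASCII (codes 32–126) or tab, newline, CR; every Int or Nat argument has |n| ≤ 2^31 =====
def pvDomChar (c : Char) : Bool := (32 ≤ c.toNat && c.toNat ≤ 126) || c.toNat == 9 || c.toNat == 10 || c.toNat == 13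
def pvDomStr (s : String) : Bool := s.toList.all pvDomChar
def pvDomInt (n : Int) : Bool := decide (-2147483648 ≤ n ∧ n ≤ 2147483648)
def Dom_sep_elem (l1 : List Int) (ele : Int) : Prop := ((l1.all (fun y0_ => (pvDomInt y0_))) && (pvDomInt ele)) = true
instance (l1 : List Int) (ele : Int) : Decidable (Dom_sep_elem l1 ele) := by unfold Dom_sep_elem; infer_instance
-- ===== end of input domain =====

-- B replaces A's two index passes (occurrence-index table, then slices between
-- consecutive indices) with a single streaming pass (seen-flag + buffer); simpler.

-- ===== PORT A =====
def sep_elem (l1 : List Int) (ele : Int) : List (List Int) :=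
  let _c := PySem.List.count l1 ele
  let emp : List Int :=
    (PySem.List.pyRange 0 (l1.length : Int) 1).foldl
      (fun emp i => if PySem.List.pyGetD l1 i 0 = ele then emp ++ [i] else emp) []
  let len_e : Int := (emp.length : Int)
  (PySem.List.pyRange 0 (len_e - 1) 1).foldl
    (fun newl j =>
      newl ++ [PySem.List.slice l1 (some (PySem.List.pyGetD emp j 0 + 1))
                                   (some (PySem.List.pyGetD emp (j + 1) 0))]) []

-- ===== PORT B =====
def sep_elem_alt (l1 : List Int) (ele : Int) : List (List Int) :=
  (l1.foldl
    (fun (st : List (List Int) × List Int × Bool) x =>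
      let (newl, buf, seen) := st
      if x = ele then
        (if seen then newl ++ [buf] else newl, [], true)
      else if seen then (newl, buf ++ [x], seen)
      else st)
    ([], [], false)).1

-- ===== PRECONDITION & SPEC =====
def Spec_sep_elem (l1 : List Int) (ele : Int) (out : List (List Int)) : Prop := out = sep_elem_alt l1 ele
instance (l1 : List Int) (ele : Int) (out : List (List Int)) : Decidable (Spec_sep_elem l1 ele out) := by unfold Spec_sep_elem; infer_instance

-- ===== CLAIM (what is proved, stated in full; the proofs are below) =====
def Claim_equal_sep_elem : Prop := ∀ (l1 : List Int) (ele : Int), Dom_sep_elem l1 ele → Spec_sep_elem l1 ele (sep_elem l1 ele)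

-- ===== LEMMAS AND PROOFS =====

-- indices (0-based) of occurrences of e
def occs (e : Int) : List Int → List Nat
  | [] => []
  | x :: xs => if x = e then 0 :: (occs e xs).map (· + 1) else (occs e xs).map (· + 1)

-- the segments A extracts, from consecutive pairs of occurrence indices
def pairsOut (l : List Int) : List Nat → List (List Int)
  | i :: j :: rest => (l.drop (i + 1)).take (j - (i + 1)) :: pairsOut l (j :: rest)
  | _ => []

-- reference recursion matching B's streaming pass
def segsAfter (e : Int) : List Int → List Int → List (List Int)
  | [], _ => []
  | x :: xs, buf => if x = e then buf :: segsAfter e xs [] else segsAfter e xs (buf ++ [x])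

def segsRef (e : Int) : List Int → List (List Int)
  | [] => []
  | x :: xs => if x = e then segsAfter e xs [] else segsRef e xs

-- named copies of the fold bodies, for the proofs
def stepB (e : Int) (st : List (List Int) × List Int × Bool) (x : Int) :
    List (List Int) × List Int × Bool :=
  let (newl, buf, seen) := st
  if x = e then (if seen then newl ++ [buf] else newl, [], true)
  else if seen then (newl, buf ++ [x], seen)
  else st

def stepE (l : List Int) (e : Int) (emp : List Int) (i : Int) : List Int :=
  if PySem.List.pyGetD l i 0 = e then emp ++ [i] else emp

def stepN (l emp : List Int) (newl : List (List Int)) (j : Int) : List (List Int) :=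
  newl ++ [PySem.List.slice l (some (PySem.List.pyGetD emp j 0 + 1))
                              (some (PySem.List.pyGetD emp (j + 1) 0))]

theorem alt_eq_fold (l : List Int) (e : Int) :
    sep_elem_alt l e = (l.foldl (stepB e) ([], [], false)).1 := rfl

theorem a_eq_fold (l : List Int) (e : Int) :
    sep_elem l e =
      (PySem.List.pyRange 0
        ((((PySem.List.pyRange 0 (l.length : Int) 1).foldl (stepE l e) []).length : Int) - 1) 1).foldl
        (stepN l ((PySem.List.pyRange 0 (l.length : Int) 1).foldl (stepE l e) [])) [] := rfl

theorem foldB_seen (e : Int) (xs : List Int) :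
    ∀ (buf : List Int) (newl : List (List Int)),
      (xs.foldl (stepB e) (newl, buf, true)).1 = newl ++ segsAfter e xs buf := by
  induction xs with
  | nil => intro buf newl; simp [segsAfter]
  | cons x xs ih =>
    intro buf newl
    by_cases h : x = e
    · simp [List.foldl_cons, stepB, h, segsAfter, ih]
    · simp [List.foldl_cons, stepB, h, segsAfter, ih]

theorem foldB_unseen (e : Int) (xs : List Int) :
    ∀ (newl : List (List Int)),
      (xs.foldl (stepB e) (newl, [], false)).1 = newl ++ segsRef e xs := by
  induction xs with
  | nil => intro newl; simp [segsRef]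
  | cons x xs ih =>
    intro newl
    by_cases h : x = e
    · simp [List.foldl_cons, stepB, h, segsRef, foldB_seen]
    · simp [List.foldl_cons, stepB, h, segsRef, ih]

theorem alt_eq_segsRef (l : List Int) (e : Int) : sep_elem_alt l e = segsRef e l := by
  rw [alt_eq_fold, foldB_unseen]; simp

theorem getD_map_append (pre tail : List Nat) (i : Nat) :
    ((pre ++ i :: tail).map (fun n : Nat => (n : Int))).getD pre.length 0 = (i : Int) := by
  simp [List.map_append, List.getD_eq_getElem?_getD]

theorem foldE (e : Int) (suf : List Int) :
    ∀ (pre : List Int) (acc : List Int),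
      (PySem.List.pyRange (pre.length : Int) (((pre.length + suf.length : Nat) : Int)) 1).foldl
        (stepE (pre ++ suf) e) acc
      = acc ++ (occs e suf).map (fun k => ((pre.length + k : Nat) : Int)) := by
  induction suf with
  | nil => intro pre acc; rw [PySem.List.pyRange_one_eq_nil (by simp)]; simp [occs]
  | cons x xs ih =>
    intro pre acc
    rw [PySem.List.pyRange_one_cons (by push_cast [List.length_cons]; omega)]
    rw [List.foldl_cons]
    have hget : PySem.List.pyGetD (pre ++ x :: xs) ((pre.length : Nat) : Int) 0 = x := by
      simp [PySem.List.pyGetD_natCast, List.getD_eq_getElem?_getD]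
    have hlen : ((pre.length : Int)) + 1 = (((pre ++ [x]).length : Nat) : Int) := by
      simp
    have hbound : (((pre.length + (x :: xs).length : Nat) : Int))
        = (((pre ++ [x]).length + xs.length : Nat) : Int) := by
      simp; omega
    have hl : pre ++ x :: xs = (pre ++ [x]) ++ xs := by simp
    have hmap : List.map ((fun k => ((pre.length + k : Nat) : Int)) ∘ (· + 1)) (occs e xs)
        = List.map (fun k => (((pre ++ [x]).length + k : Nat) : Int)) (occs e xs) := by
      apply List.map_congr_left; intro a _; simp; omega
    by_cases h : x = e
    · rw [stepE, hget, if_pos h, hlen, hbound, hl, ih (pre ++ [x])]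
      rw [occs, if_pos h, List.map_cons, List.map_map, hmap]
      simp
    · rw [stepE, hget, if_neg h, hlen, hbound, hl, ih (pre ++ [x])]
      rw [occs, if_neg h, List.map_map, hmap]

theorem foldN (l : List Int) (os : List Nat) :
    ∀ (pre : List Nat) (emp : List Int), emp = (pre ++ os).map (fun n : Nat => (n : Int)) →
    ∀ (acc : List (List Int)),
      (PySem.List.pyRange (pre.length : Int) ((((pre.length + os.length : Nat) : Int)) - 1) 1).foldl
        (stepN l emp) acc
      = acc ++ pairsOut l os := by
  induction os with
  | nil =>
    intro pre emp _ acc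
    rw [PySem.List.pyRange_one_eq_nil (by push_cast [List.length_nil]; omega)]; simp [pairsOut]
  | cons i tail ih =>
    intro pre emp hemp acc
    subst hemp
    cases tail with
    | nil =>
      rw [PySem.List.pyRange_one_eq_nil (by push_cast [List.length_cons, List.length_nil]; omega)]
      simp [pairsOut]
    | cons j rest =>
      rw [PySem.List.pyRange_one_cons (by push_cast [List.length_cons]; omega)]
      rw [List.foldl_cons]
      have hg1 : PySem.List.pyGetD ((pre ++ i :: j :: rest).map (fun n : Nat => (n : Int)))
          ((pre.length : Nat) : Int) 0 = (i : Int) := by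
        rw [PySem.List.pyGetD_natCast]; exact getD_map_append pre (j :: rest) i
      have hg2 : PySem.List.pyGetD ((pre ++ i :: j :: rest).map (fun n : Nat => (n : Int)))
          (((pre.length : Nat) : Int) + 1) 0 = (j : Int) := by
        have h1 : ((pre.length : Int)) + 1 = (((pre ++ [i]).length : Nat) : Int) := by simp
        have h2 : pre ++ i :: j :: rest = (pre ++ [i]) ++ j :: rest := by simp
        rw [h1, h2, PySem.List.pyGetD_natCast]
        exact getD_map_append (pre ++ [i]) rest j
      rw [stepN, hg1, hg2]
      have hsl : PySem.List.slice l (some ((i : Int) + 1)) (some (j : Int))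
          = (l.drop (i + 1)).take (j - (i + 1)) := by
        have : ((i : Int)) + 1 = (((i + 1 : Nat)) : Int) := by push_cast; ring
        rw [this, PySem.List.slice_natCast]
      rw [hsl]
      have hlen : ((pre.length : Int)) + 1 = (((pre ++ [i]).length : Nat) : Int) := by simp
      have hbound : ((((pre.length + (i :: j :: rest).length : Nat) : Int)) - 1)
          = ((((pre ++ [i]).length + (j :: rest).length : Nat) : Int) - 1) := by
        push_cast [List.length_cons, List.length_append, List.length_nil]; omega
      have hl : pre ++ i :: j :: rest = (pre ++ [i]) ++ j :: rest := by simp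
      rw [hlen, hbound, hl, ih (pre ++ [i]) _ rfl]
      rw [pairsOut]
      simp

theorem pairsOut_shift (l : List Int) (x : Int) (os : List Nat) :
    pairsOut (x :: l) (os.map (· + 1)) = pairsOut l os := by
  induction os with
  | nil => simp [pairsOut]
  | cons i tail ih =>
    cases tail with
    | nil => simp [pairsOut]
    | cons j rest =>
      simp only [List.map_cons] at ih ⊢
      rw [pairsOut, pairsOut, ih]
      congr 1
      have h1 : i + 1 + 1 = i + 2 := by omega
      have h2 : j + 1 - (i + 1 + 1) = j - (i + 1) := by omega
      rw [h1, h2, List.drop_succ_cons]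

theorem segsAfter_eq (e : Int) (xs : List Int) :
    ∀ buf, segsAfter e xs buf =
      match occs e xs with
      | [] => []
      | i :: rest => (buf ++ xs.take i) :: pairsOut xs (i :: rest) := by
  induction xs with
  | nil => intro buf; simp [segsAfter, occs]
  | cons x xs ih =>
    intro buf
    by_cases h : x = e
    · rw [segsAfter, if_pos h, occs, if_pos h]
      rcases ho : occs e xs with _ | ⟨i, rest⟩
      · simp only [List.map_nil]
        rw [pairsOut.eq_def]
        simp [ih [], ho]
      · simp only [List.map_cons]
        rw [pairsOut]
        have hsh : pairsOut (x :: xs) ((i + 1) :: rest.map (· + 1)) = pairsOut xs (i :: rest) := by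
          have := pairsOut_shift xs x (i :: rest)
          simpa using this
        rw [hsh]
        rw [ih []]
        simp [ho]
    · rw [segsAfter, if_neg h, occs, if_neg h]
      rcases ho : occs e xs with _ | ⟨i, rest⟩
      · simp only [List.map_nil]
        rw [ih (buf ++ [x])]
        simp [ho]
      · simp only [List.map_cons]
        rw [ih (buf ++ [x])]
        simp only [ho]
        have hsh : pairsOut (x :: xs) ((i + 1) :: rest.map (· + 1)) = pairsOut xs (i :: rest) := by
          have := pairsOut_shift xs x (i :: rest)
          simpa using this
        rw [hsh]
        simp [List.take_succ_cons, List.append_assoc]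

theorem pairsOut_cons_zero (e x : Int) (xs : List Int) :
    pairsOut (x :: xs) (0 :: (occs e xs).map (· + 1)) = segsAfter e xs [] := by
  rw [segsAfter_eq e xs []]
  rcases ho : occs e xs with _ | ⟨i, rest⟩
  · simp [pairsOut]
  · simp only [List.map_cons]
    rw [pairsOut]
    have hsh : pairsOut (x :: xs) ((i + 1) :: rest.map (· + 1)) = pairsOut xs (i :: rest) := by
      have := pairsOut_shift xs x (i :: rest)
      simpa using this
    rw [hsh]
    simp

theorem segsRef_eq_pairsOut (e : Int) (l : List Int) :
    segsRef e l = pairsOut l (occs e l) := by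
  induction l with
  | nil => simp [segsRef, occs, pairsOut]
  | cons x xs ih =>
    by_cases h : x = e
    · rw [segsRef, if_pos h, occs, if_pos h, pairsOut_cons_zero]
    · rw [segsRef, if_neg h, occs, if_neg h, ih, pairsOut_shift]

theorem a_eq_pairsOut (l : List Int) (e : Int) :
    sep_elem l e = pairsOut l (occs e l) := by
  rw [a_eq_fold]
  have h1 := foldE e l [] []
  simp only [List.nil_append, List.length_nil, Nat.cast_zero, Nat.zero_add] at h1
  rw [h1]
  have h2 := foldN l (occs e l) [] ((occs e l).map (fun k : Nat => (k : Int))) (by rw [List.nil_append]) []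
  simp only [List.nil_append, List.length_nil, Nat.cast_zero, Nat.zero_add] at h2
  rw [List.length_map]
  exact h2

-- ===== VERDICT =====
theorem sep_elem_spec : Claim_equal_sep_elem := by
  intro l e _
  unfold Spec_sep_elem
  rw [a_eq_pairsOut, ← segsRef_eq_pairsOut, ← alt_eq_segsRef]
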